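-- pv_equiv track=rewrite | github.com/YavuzBozkurt/HackerRank | Backtracking Monke/prime xor/prime.py | xorIsPrime
-- ===== SOURCE A (Python) =====
-- from collections import Counter
--
-- def isPrime(val):
--     if val < 2:
--         return False
--
--     for number in range(2, val):
--         # if val is divisible by number, then val is not prime
--         if val % number == 0:
--             return False
--
--     # all checks passed, thus, val is prime
--     return True
--
-- def xorIsPrime(solutions, multiset, a):
--
--     for element in solutions:
--         count1 = Counter(element)
--         count2 = Counter(multiset)
--         if count1 == count2:
--             return False
--
--     considered = [val for val in a]
--     for i in range(len(multiset)):
--         if multiset[i] in considered: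
--             considered[considered.index(multiset[i])] = -1000000000
--         else:
--             return False
--
--     xor_result = 0
--     for value in multiset:
--         xor_result = xor_result ^ value
--
--     if isPrime(xor_result):
--         return True
--     else:
--         return False
-- ===== SOURCE B (Python) =====
-- from collections import Counter
--
-- def isPrime(val):
--     if val < 2:
--         return False
--     d = 2
--     while d * d <= val:
--         if val % d == 0:
--             return False
--         d += 1
--     return True
--
-- def xorIsPrime(solutions, multiset, a):
--     cm = Counter(multiset)
--     if any(Counter(element) == cm for element in solutions):
--         return False
--     have = Counter(a)
--     if any(have[v] < c for v, c in cm.items()):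
--         return False
--     x = 0
--     for v in multiset:
--         x ^= v
--     return isPrime(x)
-- ===== Notes on version B (the rewrite author's own statement) =====
-- stated objective: faster
-- what changed: Trial division to val is replaced by trial division up to sqrt(val) (d*d <= val), the per-element Counter(multiset) in the seen-check is hoisted out of the loop, and the quadratic list-consumption submultiset check (membership + .index + sentinel overwrite per element) is replaced by a single Counter-vs-Counter comparison.
-- outside the precondition, e.g. on xorIsPrime([], [-1000000000, -1000000000, 2], [2, -1000000000]): A returns True, B returns False
import Mathlib
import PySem

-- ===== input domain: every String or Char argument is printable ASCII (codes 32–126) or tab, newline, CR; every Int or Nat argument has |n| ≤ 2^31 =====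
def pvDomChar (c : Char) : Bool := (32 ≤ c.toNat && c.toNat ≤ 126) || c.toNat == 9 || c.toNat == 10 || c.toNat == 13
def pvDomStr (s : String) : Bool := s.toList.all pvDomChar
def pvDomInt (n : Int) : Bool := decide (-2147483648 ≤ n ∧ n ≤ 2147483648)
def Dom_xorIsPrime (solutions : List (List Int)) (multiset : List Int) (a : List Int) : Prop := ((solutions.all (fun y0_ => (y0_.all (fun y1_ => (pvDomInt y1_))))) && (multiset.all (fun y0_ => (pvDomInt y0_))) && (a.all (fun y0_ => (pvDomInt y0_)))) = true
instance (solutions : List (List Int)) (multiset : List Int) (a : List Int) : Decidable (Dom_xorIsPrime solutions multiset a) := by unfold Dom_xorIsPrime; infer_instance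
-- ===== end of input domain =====

-- B: sqrt-bounded trial division, hoisted Counter(multiset), and a Counter comparison instead of
-- the quadratic sentinel-marking consumption loop (objective: faster).


-- ===== PORT A =====

-- Python dict equality (order-insensitive), used by both ports for 'Counter(...) == Counter(...)'
def pvDictEq (d1 d2 : PySem.Dict Int Int) : Bool :=
  d1.items.all (fun p => d2.get? p.1 == some p.2) && d2.items.all (fun p => d1.get? p.1 == some p.2)

def pvIsPrimeA (val : Int) : Bool :=
  if val < 2 then false
  else (PySem.List.pyRange 2 val 1).all (fun number => !(PySem.Int.mod val number == 0))

-- A's 'for i in range(len(multiset))' consumption loop; none = the early 'return False'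
def pvConsumeA (considered : List Int) (ms : List Int) : Option (List Int) :=
  match ms with
  | [] => some considered
  | m :: rest =>
    if considered.contains m then
      match PySem.List.index? considered m with
      | some j => pvConsumeA (considered.set j (-1000000000)) rest
      | none => none   -- unreachable: 'considered.index' is guarded by the 'in' test
    else none

def xorIsPrime (solutions : List (List Int)) (multiset : List Int) (a : List Int) : Bool :=
  if solutions.any (fun element =>
       pvDictEq (PySem.Dict.counter element) (PySem.Dict.counter multiset)) then false
  else
    match pvConsumeA (a.map (fun val => val)) multiset with
    | none => false
    | some _ =>
      let xor_result := multiset.foldl (fun acc value => PySem.Int.bxor acc value) 0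
      if pvIsPrimeA xor_result then true else false

-- ===== PORT B =====

theorem pvTrialB_le {val d : Int} (h : d * d ≤ val) : d ≤ val := by
  nlinarith [mul_self_nonneg d]

def pvTrialB (val : Int) (d : Int) : Bool :=
  if h : d * d ≤ val then
    if PySem.Int.mod val d == 0 then false else pvTrialB val (d + 1)
  else true
termination_by (val + 1 - d).toNat
decreasing_by
  have := pvTrialB_le h
  omega

def pvIsPrimeB (val : Int) : Bool :=
  if val < 2 then false else pvTrialB val 2

def xorIsPrime_alt (solutions : List (List Int)) (multiset : List Int) (a : List Int) : Bool :=
  let cm := PySem.Dict.counter multiset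
  if solutions.any (fun element => pvDictEq (PySem.Dict.counter element) cm) then false
  else
    let haveC := PySem.Dict.counter a
    if cm.items.any (fun p => haveC.getD p.1 0 < p.2) then false
    else pvIsPrimeB (multiset.foldl (fun x v => PySem.Int.bxor x v) 0)

-- ===== PRECONDITION & SPEC =====

-- Pre_ excludes inputs whose multiset contains A's in-band sentinel value -1000000000: there A's
-- sentinel-marking consumption loop can accept a multiset that is not contained in a, an artefact
-- of marking consumed slots with a representable value, so its answer is an accident of element
-- order; B performs the genuine sub-multiset test there.
def Pre_xorIsPrime (solutions : List (List Int)) (multiset : List Int) (a : List Int) : Prop :=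
  (-1000000000 : Int) ∉ multiset
instance (solutions : List (List Int)) (multiset : List Int) (a : List Int) : Decidable (Pre_xorIsPrime solutions multiset a) := by unfold Pre_xorIsPrime; infer_instance

def pvWitness_xorIsPrime : List (List Int) × List Int × List Int :=
  ([[1, 2]], [1, 2], [2, 1, 3])

def Spec_xorIsPrime (solutions : List (List Int)) (multiset : List Int) (a : List Int) (out : Bool) : Prop := out = xorIsPrime_alt solutions multiset a
instance (solutions : List (List Int)) (multiset : List Int) (a : List Int) (out : Bool) : Decidable (Spec_xorIsPrime solutions multiset a out) := by unfold Spec_xorIsPrime; infer_instance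

-- ===== CLAIM (what is proved, stated in full; the proofs are below) =====
def Claim_equal_xorIsPrime : Prop := ∀ (solutions : List (List Int)) (multiset : List Int) (a : List Int), Dom_xorIsPrime solutions multiset a → Pre_xorIsPrime solutions multiset a → Spec_xorIsPrime solutions multiset a (xorIsPrime solutions multiset a)

-- ===== LEMMAS AND PROOFS =====

-- trial division by all of [2, val) and by divisors with d*d ≤ val agree
theorem pvTrialB_iff (val k : Int) (hk : 0 ≤ k) :
    pvTrialB val k = true ↔ ∀ d : Int, k ≤ d → d * d ≤ val → ¬ d ∣ val := by
  fun_induction pvTrialB val k with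
  | case1 a hsq hmod =>
    simp only [Bool.false_eq_true, false_iff]
    intro hall
    exact hall a le_rfl hsq ((PySem.Int.mod_eq_zero_iff_dvd val a).mp (by simpa using hmod))
  | case2 a hsq hmod ih =>
    rw [ih (by omega)]
    constructor
    · intro hall e hle hsq'
      rcases eq_or_lt_of_le hle with rfl | hlt
      · exact fun hdvd => hmod (by simpa using (PySem.Int.mod_eq_zero_iff_dvd val a).mpr hdvd)
      · exact hall e (by omega) hsq'
    · intro hall e hle hsq'
      exact hall e (by omega) hsq'
  | case3 a hsq =>
    simp only [true_iff]
    intro e hle hsq'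
    exact absurd hsq' (by nlinarith)

theorem pvIsPrime_eq (val : Int) : pvIsPrimeA val = pvIsPrimeB val := by
  unfold pvIsPrimeA pvIsPrimeB
  split
  · rfl
  · rename_i hval
    rw [Bool.eq_iff_iff, List.all_eq_true, pvTrialB_iff val 2 (by omega)]
    constructor
    · intro hall d h2 hsq hdvd
      have hd : d < val := by nlinarith
      have := hall d (PySem.List.mem_pyRange_one.mpr ⟨h2, hd⟩)
      simp only [Bool.not_eq_eq_eq_not, Bool.not_true, beq_eq_false_iff_ne] at this
      exact this ((PySem.Int.mod_eq_zero_iff_dvd val d).mpr hdvd)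
    · intro hall d hmem
      obtain ⟨h2, hlt⟩ := PySem.List.mem_pyRange_one.mp hmem
      simp only [Bool.not_eq_eq_eq_not, Bool.not_true, beq_eq_false_iff_ne]
      intro hmod
      obtain ⟨e, he⟩ := (PySem.Int.mod_eq_zero_iff_dvd val d).mp hmod
      have hd0 : 0 < d := by omega
      have he2 : 2 ≤ e := by nlinarith
      by_cases hde : d ≤ e
      · exact hall d h2 (by nlinarith) ⟨e, he⟩
      · exact hall e he2 (by nlinarith) ⟨d, by rw [he, mul_comm]⟩

-- A's consumption loop succeeds exactly on sub-multisets (sentinel absent from ms)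
theorem pvConsume_isSome (ms : List Int) (h : (-1000000000 : Int) ∉ ms) :
    ∀ cons : List Int, (pvConsumeA cons ms).isSome = true ↔ ∀ v ∈ ms, ms.count v ≤ cons.count v := by
  induction ms with
  | nil => intro cons; simp [pvConsumeA]
  | cons m rest ih =>
    intro cons
    have hmS : m ≠ (-1000000000 : Int) := fun he => h (he ▸ List.mem_cons_self)
    have hrS : (-1000000000 : Int) ∉ rest := fun he => h (List.mem_cons_of_mem _ he)
    rw [pvConsumeA]
    by_cases hmem : m ∈ cons
    · rw [if_pos (List.contains_iff_mem.mpr hmem)]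
      obtain ⟨j, hj⟩ : ∃ j, PySem.List.index? cons m = some j :=
        Option.isSome_iff_exists.mp ((PySem.List.index?_isSome_iff (xs := cons) (v := m)).mpr hmem)
      rw [hj]
      obtain ⟨hk, hget, -⟩ := PySem.List.getElem_of_index?_eq_some hj
      have hsplit : cons = cons.take j ++ cons[j] :: cons.drop (j+1) := by
        conv_lhs => rw [← List.take_append_drop j cons, List.drop_eq_getElem_cons hk]
      have hset : cons.set j (-1000000000) = cons.take j ++ (-1000000000 : Int) :: cons.drop (j+1) :=
        List.set_eq_take_cons_drop _ hk
      have hcount : ∀ v : Int, v ≠ (-1000000000 : Int) →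
          (cons.set j (-1000000000)).count v + (if v = m then 1 else 0) = cons.count v := by
        intro v hv
        conv_rhs => rw [hsplit]
        rw [hset, hget]
        simp only [List.count_append, List.count_cons, beq_iff_eq, eq_comm (b := v)]
        split_ifs <;> omega
      rw [ih hrS]
      constructor
      · intro hsome v hvmem
        have hvS : v ≠ (-1000000000 : Int) := fun he => h (he ▸ hvmem)
        have h1 : rest.count v ≤ (cons.set j (-1000000000)).count v := by
          by_cases hv : v ∈ rest
          · exact hsome v hv
          · simp [List.count_eq_zero.mpr hv]
        have h2 := hcount v hvS
        have h4 : 0 < cons.count m := List.count_pos_iff.mpr hmem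
        rw [List.count_cons]
        simp only [beq_iff_eq, eq_comm (b := v)] at *
        split_ifs at * <;> omega
      · intro hall v hv
        have hvS : v ≠ (-1000000000 : Int) := fun he => h (he ▸ List.mem_cons_of_mem _ hv)
        have h2 := hcount v hvS
        have hml := hall v (List.mem_cons_of_mem _ hv)
        rw [List.count_cons] at hml
        simp only [beq_iff_eq, eq_comm (b := v)] at *
        split_ifs at * <;> omega
    · rw [if_neg (by simpa [List.contains_iff_mem] using hmem)]
      simp only [Option.isSome_none, Bool.false_eq_true, false_iff]
      intro hall
      have h1 := hall m List.mem_cons_self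
      simp only [List.count_cons_self] at h1
      exact hmem (List.count_pos_iff.mp (by omega))

theorem pvMain (solutions : List (List Int)) (multiset : List Int) (a : List Int)
    (hpre : (-1000000000 : Int) ∉ multiset) :
    xorIsPrime solutions multiset a = xorIsPrime_alt solutions multiset a := by
  unfold xorIsPrime xorIsPrime_alt
  simp only [List.map_id']
  by_cases hseen : solutions.any (fun element =>
      pvDictEq (PySem.Dict.counter element) (PySem.Dict.counter multiset)) = true
  · rw [if_pos hseen, if_pos hseen]
  · rw [if_neg hseen, if_neg hseen]
    have hiff := pvConsume_isSome multiset hpre a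
    by_cases hsub : ∀ v ∈ multiset, multiset.count v ≤ a.count v
    · obtain ⟨r, hr⟩ := Option.isSome_iff_exists.mp (hiff.mpr hsub)
      rw [hr]
      have hBany : ((PySem.Dict.counter multiset).items.any
          (fun p => decide ((PySem.Dict.counter a).getD p.1 0 < p.2))) = false := by
        rw [PySem.Dict.items_counter, List.any_map]
        simp only [List.any_eq_false, Function.comp_apply, PySem.Dict.getD_counter,
          decide_eq_true_eq, not_lt]
        intro k hk
        exact_mod_cast hsub k ((PySem.Set.mem_ofList _ _).mp hk)
      rw [hBany]
      simp [pvIsPrime_eq]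
    · have hnone : pvConsumeA a multiset = none := by
        rcases hc : pvConsumeA a multiset with _ | r
        · rfl
        · exact absurd (hiff.mp (by rw [hc]; rfl)) hsub
      rw [hnone]
      have hBany : ((PySem.Dict.counter multiset).items.any
          (fun p => decide ((PySem.Dict.counter a).getD p.1 0 < p.2))) = true := by
        push Not at hsub
        obtain ⟨k, hk, hlt⟩ := hsub
        rw [PySem.Dict.items_counter, List.any_map, List.any_eq_true]
        exact ⟨k, (PySem.Set.mem_ofList _ _).mpr hk, by
          simp only [Function.comp_apply, PySem.Dict.getD_counter, decide_eq_true_eq]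
          exact_mod_cast hlt⟩
      rw [hBany]
      rfl

-- ===== VERDICT (by name: the statement is the Claim_ definition above) =====
theorem xorIsPrime_spec : Claim_equal_xorIsPrime := by
  intro solutions multiset a _ hpre
  unfold Spec_xorIsPrime
  exact pvMain solutions multiset a hpre
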